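-- pv_equiv track=rewrite | github.com/idopinto/wonda | wonda/data_pipeline/baseline_dataset_common.py | map_invariant_line_to_marker
-- ===== SOURCE A (Python) =====
-- from typing import Any, Optional
--
-- def map_invariant_line_to_marker(
--     invariant_line: int, program_code: str, available_markers: list[str]
-- ) -> Optional[str]:
--     """Map a UAutomizer invariant line number to the nearest loop marker.
--
--     Markers are inserted at the start of loop bodies.  Returns the marker
--     whose line is closest to (and ``<=``) *invariant_line*, or ``None`` if
--     no markers exist.
--     """
--     marker_positions: dict[str, int] = {}
--     lines = program_code.split("\n")
--
--     for marker in available_markers: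
--         if marker == "TARGET_ASSERT_MARKER":
--             continue
--         for line_idx, line in enumerate(lines, start=1):
--             if marker in line and marker not in marker_positions:
--                 marker_positions[marker] = line_idx
--
--     if not marker_positions:
--         return None
--
--     # Prefer the marker closest to (and <=) the invariant line.
--     candidates = {
--         m: pos for m, pos in marker_positions.items() if pos <= invariant_line
--     }
--     if not candidates:
--         return min(marker_positions.items(), key=lambda x: x[1])[0]
--     return max(candidates.items(), key=lambda x: x[1])[0]
-- ===== SOURCE B (Python) =====
-- def map_invariant_line_to_marker(invariant_line, program_code, available_markers):
--     """Single pass: for each marker find its first line, keep the best <= line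
--     and the overall-minimum fallback; no dict, no second selection phase."""
--     lines = program_code.split("\n")
--     best_le = None   # (marker, pos) with max pos <= invariant_line, first-seen on ties
--     best_any = None  # (marker, pos) with min pos overall, first-seen on ties
--     for marker in available_markers:
--         if marker == "TARGET_ASSERT_MARKER":
--             continue
--         pos = None
--         for idx, line in enumerate(lines, start=1):
--             if marker in line:
--                 pos = idx
--                 break
--         if pos is None:
--             continue
--         if pos <= invariant_line and (best_le is None or best_le[1] < pos):
--             best_le = (marker, pos)
--         if best_any is None or pos < best_any[1]:
--             best_any = (marker, pos)
--     if best_le is not None: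
--         return best_le[0]
--     return best_any[0] if best_any is not None else None
-- ===== Notes on version B (the rewrite author's own statement) =====
-- stated objective: simpler
-- what changed: B merges A's two phases (build a marker->first-line dict, then select via a filtered comprehension plus max/min over items) into a single pass over available_markers that finds each marker's first line with an early-break scan and maintains a running best-(<= invariant_line) marker and a running minimum fallback, preserving first-seen tie-breaking with strict comparisons; the dict and the candidates comprehension disappear.
import Mathlib
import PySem

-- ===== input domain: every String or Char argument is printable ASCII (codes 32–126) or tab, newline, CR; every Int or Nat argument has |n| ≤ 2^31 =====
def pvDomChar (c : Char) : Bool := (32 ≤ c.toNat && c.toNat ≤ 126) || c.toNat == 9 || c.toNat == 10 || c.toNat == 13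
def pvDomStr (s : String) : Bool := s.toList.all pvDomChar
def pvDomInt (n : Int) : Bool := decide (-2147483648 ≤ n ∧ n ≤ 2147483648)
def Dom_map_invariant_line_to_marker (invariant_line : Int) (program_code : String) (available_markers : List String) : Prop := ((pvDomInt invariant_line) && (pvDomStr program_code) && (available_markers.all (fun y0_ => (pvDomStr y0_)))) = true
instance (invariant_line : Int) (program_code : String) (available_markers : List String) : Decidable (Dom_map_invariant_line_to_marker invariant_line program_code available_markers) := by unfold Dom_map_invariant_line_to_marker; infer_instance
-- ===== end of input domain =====

-- B merges A's dict-building and selection phases into one pass keeping a running best-(<= line) marker and a minimum fallback (objective: simpler).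



-- ===== PORT A =====
-- python enumerate(lines, start=1)
def pvEnum1 (i : Int) : List String → List (Int × String)
  | [] => []
  | l :: ls => (i, l) :: pvEnum1 (i + 1) ls

-- A's inner loop body: if marker in line and marker not in marker_positions: insert
def pvAStep (marker : String) (d : PySem.Dict String Int) (p : Int × String) : PySem.Dict String Int :=
  if PySem.Str.isIn marker p.2 && !(d.contains marker) then d.insert marker p.1 else d

def map_invariant_line_to_marker (invariant_line : Int) (program_code : String) (available_markers : List String) : Option String :=
  let lines := (PySem.Str.split? program_code "\n").getD []   -- sep "\n" is nonempty: split? is always some here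
  let marker_positions := available_markers.foldl
    (fun d marker =>
      if marker == "TARGET_ASSERT_MARKER" then d
      else (pvEnum1 1 lines).foldl (pvAStep marker) d)
    PySem.Dict.empty
  if marker_positions.items.isEmpty then none
  else
    -- dict comprehension over items: keys are already distinct, so the new dict's items are the filtered items
    let candidates := marker_positions.items.filter (fun p => p.2 ≤ invariant_line)
    if candidates.isEmpty then (PySem.List.min? marker_positions.items (fun x => x.2)).map (fun x => x.1)
    else (PySem.List.max? candidates (fun x => x.2)).map (fun x => x.1)

-- ===== PORT B =====
-- B's inner loop with break: first line index (1-based) whose line contains marker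
def pvFirstPos (marker : String) (i : Int) : List String → Option Int
  | [] => none
  | l :: ls => if PySem.Str.isIn marker l then some i else pvFirstPos marker (i + 1) ls

-- B's single-pass state update: (best_le, best_any)
def pvBStep (invariant_line : Int) (lines : List String)
    (st : Option (String × Int) × Option (String × Int)) (marker : String) :
    Option (String × Int) × Option (String × Int) :=
  if marker == "TARGET_ASSERT_MARKER" then st
  else
    match pvFirstPos marker 1 lines with
    | none => st
    | some pos =>
      let bestLe := if pos ≤ invariant_line then
          match st.1 with
          | none => some (marker, pos)
          | some q => if q.2 < pos then some (marker, pos) else some q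
        else st.1
      let bestAny :=
          match st.2 with
          | none => some (marker, pos)
          | some q => if pos < q.2 then some (marker, pos) else some q
      (bestLe, bestAny)

def map_invariant_line_to_marker_alt (invariant_line : Int) (program_code : String) (available_markers : List String) : Option String :=
  let lines := (PySem.Str.split? program_code "\n").getD []
  let st := available_markers.foldl (pvBStep invariant_line lines) (none, none)
  match st.1 with
  | some q => some q.1
  | none => st.2.map (fun q => q.1)

-- ===== PRECONDITION & SPEC =====
def Spec_map_invariant_line_to_marker (invariant_line : Int) (program_code : String) (available_markers : List String) (out : Option String) : Prop := out = map_invariant_line_to_marker_alt invariant_line program_code available_markers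
instance (invariant_line : Int) (program_code : String) (available_markers : List String) (out : Option String) : Decidable (Spec_map_invariant_line_to_marker invariant_line program_code available_markers out) := by unfold Spec_map_invariant_line_to_marker; infer_instance

-- ===== CLAIM (what is proved, stated in full; the proofs are below) =====
def Claim_equal_map_invariant_line_to_marker : Prop := ∀ (invariant_line : Int) (program_code : String) (available_markers : List String), Dom_map_invariant_line_to_marker invariant_line program_code available_markers → Spec_map_invariant_line_to_marker invariant_line program_code available_markers (map_invariant_line_to_marker invariant_line program_code available_markers)

-- ===== LEMMAS AND PROOFS =====


-- invariant relating A's dict state to B's (best_le, best_any) state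
def pvInv (inv : Int) (lines : List String) (d : PySem.Dict String Int)
    (st : Option (String × Int) × Option (String × Int)) : Prop :=
  st.1 = PySem.List.max? (d.items.filter (fun p => p.2 ≤ inv)) (fun x => x.2)
  ∧ st.2 = PySem.List.min? d.items (fun x => x.2)
  ∧ ∀ p ∈ d.items, pvFirstPos p.1 1 lines = some p.2

theorem pvMin?_append_singleton {α : Type} (xs : List α) (x : α) (key : α → Int) :
    PySem.List.min? (xs ++ [x]) key =
      match PySem.List.min? xs key with
      | none => some x
      | some m => if key x < key m then some x else some m := by
  simp only [PySem.List.min?, List.foldl_append, List.foldl_cons, List.foldl_nil]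
  rfl

theorem pvMax?_append_singleton {α : Type} (xs : List α) (x : α) (key : α → Int) :
    PySem.List.max? (xs ++ [x]) key =
      match PySem.List.max? xs key with
      | none => some x
      | some m => if key m < key x then some x else some m := by
  simp only [PySem.List.max?, List.foldl_append, List.foldl_cons, List.foldl_nil]
  rfl

-- A's inner line loop = lookup of the first matching line (B's helper), inserted once
theorem pvInner_eq (marker : String) (lines : List String) :
    ∀ (i : Int) (d : PySem.Dict String Int),
      (pvEnum1 i lines).foldl (pvAStep marker) d =
        if d.contains marker then d
        else
          match pvFirstPos marker i lines with
          | none => d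
          | some p => d.insert marker p := by
  induction lines with
  | nil =>
    intro i d
    cases h : d.contains marker <;> simp [pvEnum1, pvFirstPos]
  | cons l ls ih =>
    intro i d
    simp only [pvEnum1, List.foldl_cons]
    by_cases hc : d.contains marker = true
    · have hs : pvAStep marker d (i, l) = d := by
        simp [pvAStep, hc]
      rw [hs, ih, if_pos hc, if_pos hc]
    · have hc' : d.contains marker = false := by
        cases h : d.contains marker
        · rfl
        · exact absurd h hc
      by_cases hin : PySem.Str.isIn marker l = true
      · have hs : pvAStep marker d (i, l) = d.insert marker i := by
          show (if (PySem.Str.isIn marker l && !(d.contains marker)) = true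
                then d.insert marker i else d) = d.insert marker i
          rw [hin, hc']
          rfl
        rw [hs, ih, if_pos (PySem.Dict.contains_insert_self d marker i)]
        rw [if_neg hc]
        simp only [pvFirstPos]
        rw [if_pos hin]
      · have hin' : PySem.Str.isIn marker l = false := by
          cases h : PySem.Str.isIn marker l
          · rfl
          · exact absurd h hin
        have hs : pvAStep marker d (i, l) = d := by
          show (if (PySem.Str.isIn marker l && !(d.contains marker)) = true
                then d.insert marker i else d) = d
          rw [hin']
          rfl
        rw [hs, ih, if_neg hc, if_neg hc]
        simp only [pvFirstPos]
        rw [if_neg hin]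

-- one marker preserves the invariant
theorem pvStep_inv (inv : Int) (lines : List String)
    (d : PySem.Dict String Int) (st : Option (String × Int) × Option (String × Int))
    (marker : String) (h : pvInv inv lines d st) :
    pvInv inv lines
      (if marker == "TARGET_ASSERT_MARKER" then d
       else (pvEnum1 1 lines).foldl (pvAStep marker) d)
      (pvBStep inv lines st marker) := by
  unfold pvInv at h ⊢
  obtain ⟨h1, h2, h3⟩ := h
  by_cases ht : marker == "TARGET_ASSERT_MARKER"
  · simp only [pvBStep, ht, if_pos]
    exact ⟨h1, h2, h3⟩
  · simp only [ht, if_false, Bool.false_eq_true]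
    rw [pvInner_eq]
    by_cases hc : d.contains marker = true
    · -- duplicate marker: both sides are no-ops
      rw [if_pos hc]
      have hk : marker ∈ d.keys := (PySem.Dict.contains_iff_mem_keys d marker).1 hc
      have : ∃ q, (marker, q) ∈ d.items := by
        simp only [PySem.Dict.keys, List.mem_map] at hk
        obtain ⟨p, hp, heq⟩ := hk
        exact ⟨p.2, by simpa [← heq] using hp⟩
      obtain ⟨q, hq⟩ := this
      have hfp : pvFirstPos marker 1 lines = some q := by
        have := h3 (marker, q) hq
        simpa using this
      refine ⟨?_, ?_, h3⟩
      · -- best_le unchanged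
        simp only [pvBStep, ht, if_false, Bool.false_eq_true, hfp]
        by_cases hle : q ≤ inv
        · rw [if_pos hle]
          have hmem : (marker, q) ∈ d.items.filter (fun p => p.2 ≤ inv) := by
            simp [List.mem_filter, hq, hle]
          cases hm : PySem.List.max? (d.items.filter (fun p => p.2 ≤ inv)) (fun x => x.2) with
          | none =>
            exact absurd ((PySem.List.max?_eq_none_iff _ _).1 hm ▸ hmem) (by simp)
          | some m =>
            have hle2 : q ≤ m.2 := PySem.List.max?_isMax hm (marker, q) hmem
            rw [h1, hm]
            simp [not_lt.2 hle2]
        · rw [if_neg hle]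
          exact h1
      · -- best_any unchanged
        simp only [pvBStep, ht, if_false, Bool.false_eq_true, hfp]
        cases hm : PySem.List.min? d.items (fun x => (x : String × Int).2) with
        | none =>
          exact absurd ((PySem.List.min?_eq_none_iff _ _).1 hm ▸ hq) (by simp)
        | some m =>
          have hge : m.2 ≤ q := PySem.List.min?_isMin hm (marker, q) hq
          rw [h2, hm]
          simp [not_lt.2 hge]
    · have hc' : d.contains marker = false := by
        cases h : d.contains marker
        · rfl
        · exact absurd h hc
      rw [if_neg hc]
      cases hfp : pvFirstPos marker 1 lines with
      | none =>
        simp only [pvBStep, ht, if_false, Bool.false_eq_true, hfp]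
        exact ⟨h1, h2, h3⟩
      | some pos =>
        have hitems : (d.insert marker pos).items = d.items ++ [(marker, pos)] :=
          PySem.Dict.items_insert_of_not_contains d pos hc'
        simp only [pvBStep, ht, if_false, Bool.false_eq_true, hfp]
        refine ⟨?_, ?_, ?_⟩
        · rw [hitems]
          by_cases hle : pos ≤ inv
          · have hfil : (d.items ++ [(marker, pos)]).filter (fun p => p.2 ≤ inv)
                = d.items.filter (fun p => p.2 ≤ inv) ++ [(marker, pos)] := by
              simp [List.filter_append, hle]
            rw [hfil, pvMax?_append_singleton, ← h1, if_pos hle]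
            cases st.1 <;> simp
          · have hfil : (d.items ++ [(marker, pos)]).filter (fun p => p.2 ≤ inv)
                = d.items.filter (fun p => p.2 ≤ inv) := by
              simp [List.filter_append, hle]
            rw [hfil, ← h1, if_neg hle]
        · rw [hitems, pvMin?_append_singleton, ← h2]
          cases st.2 <;> simp
        · intro p hp
          rw [hitems] at hp
          rcases List.mem_append.1 hp with hp | hp
          · exact h3 p hp
          · simp only [List.mem_singleton] at hp
            subst hp
            simpa using hfp

-- the invariant holds along the whole marker loop
theorem pvFold_inv (inv : Int) (lines : List String) :
    ∀ (ams : List String) (d : PySem.Dict String Int)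
      (st : Option (String × Int) × Option (String × Int)),
      pvInv inv lines d st →
      pvInv inv lines
        (ams.foldl (fun d marker =>
            if marker == "TARGET_ASSERT_MARKER" then d
            else (pvEnum1 1 lines).foldl (pvAStep marker) d) d)
        (ams.foldl (pvBStep inv lines) st) := by
  intro ams
  induction ams with
  | nil => intro d st h; exact h
  | cons m ms ih =>
    intro d st h
    simp only [List.foldl_cons]
    exact ih _ _ (pvStep_inv inv lines d st m h)

-- ===== VERDICT (by name: the statement is the Claim_ definition above) =====

theorem map_invariant_line_to_marker_spec : Claim_equal_map_invariant_line_to_marker := by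
  intro inv pc ams _
  unfold Spec_map_invariant_line_to_marker
  show map_invariant_line_to_marker inv pc ams = map_invariant_line_to_marker_alt inv pc ams
  simp only [map_invariant_line_to_marker, map_invariant_line_to_marker_alt]
  have hbase : pvInv inv ((PySem.Str.split? pc "\n").getD []) PySem.Dict.empty (none, none) := by
    refine ⟨?_, ?_, ?_⟩ <;>
      simp [PySem.Dict.empty, PySem.List.max?, PySem.List.min?]
  have hinv := pvFold_inv inv ((PySem.Str.split? pc "\n").getD []) ams
      PySem.Dict.empty (none, none) hbase
  set lines := (PySem.Str.split? pc "\n").getD [] with hlines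
  set mp := ams.foldl (fun d marker =>
      if marker == "TARGET_ASSERT_MARKER" then d
      else (pvEnum1 1 lines).foldl (pvAStep marker) d) PySem.Dict.empty with hmp
  set st := ams.foldl (pvBStep inv lines) (none, none) with hst
  obtain ⟨h1, h2, _⟩ := hinv
  by_cases hE : mp.items.isEmpty = true
  · have hnil : mp.items = [] := List.isEmpty_iff.1 hE
    rw [if_pos hE]
    rw [hnil] at h1 h2
    simp only [List.filter_nil, PySem.List.max?, PySem.List.min?, List.foldl_nil] at h1 h2
    rw [h1, h2]
    rfl
  · rw [if_neg hE]
    by_cases hC : (mp.items.filter (fun p => p.2 ≤ inv)).isEmpty = true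
    · have hnil : mp.items.filter (fun p => p.2 ≤ inv) = [] := List.isEmpty_iff.1 hC
      rw [if_pos hC]
      rw [hnil] at h1
      simp only [PySem.List.max?, List.foldl_nil] at h1
      rw [h1, h2]
    · rw [if_neg hC]
      have hne : mp.items.filter (fun p => p.2 ≤ inv) ≠ [] := fun h => hC (by simp [h])
      cases hm : PySem.List.max? (mp.items.filter (fun p => p.2 ≤ inv)) (fun x => x.2) with
      | none => exact absurd ((PySem.List.max?_eq_none_iff _ _).1 hm) hne
      | some m =>
        rw [hm] at h1
        rw [h1]
        rfl
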